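-- pv_equiv track=rewrite | github.com/gm4-chien/Webscout-iPad | app.py | decrypt_password
-- ===== SOURCE A (Python) =====
-- def decrypt_password(encrypted_pw):
--     if not encrypted_pw: return ""
--     encrypted_pw = encrypted_pw.rstrip()
--     if not encrypted_pw or encrypted_pw == "Daizy": return ""
--     j = len(encrypted_pw)
--     step1 = "".join(chr(ord(c) - 4) for c in encrypted_pw)
--     half_j = j // 2
--     right_part = step1[-half_j:] if half_j > 0 else ""
--     left_part = step1[:j - half_j]
--     combined = right_part + left_part
--     return combined[::-1]
-- ===== SOURCE B (Python) =====
-- def decrypt_password(encrypted_pw):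
--     if not encrypted_pw:
--         return ""
--     s = encrypted_pw.rstrip()
--     if not s or s == "Daizy":
--         return ""
--     n = len(s)
--     half = n // 2
--     return "".join(chr(ord(s[(2 * n - 1 - half - i) % n]) - 4) for i in range(n))
-- ===== Notes on version B (the rewrite author's own statement) =====
-- stated objective: alternative
-- what changed: Replaces A's multi-pass pipeline (shift every char, slice into two halves, concatenate, reverse) with a single pass over output positions that reads each source character through a modular rotation index and shifts it inline.
import Mathlib
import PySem

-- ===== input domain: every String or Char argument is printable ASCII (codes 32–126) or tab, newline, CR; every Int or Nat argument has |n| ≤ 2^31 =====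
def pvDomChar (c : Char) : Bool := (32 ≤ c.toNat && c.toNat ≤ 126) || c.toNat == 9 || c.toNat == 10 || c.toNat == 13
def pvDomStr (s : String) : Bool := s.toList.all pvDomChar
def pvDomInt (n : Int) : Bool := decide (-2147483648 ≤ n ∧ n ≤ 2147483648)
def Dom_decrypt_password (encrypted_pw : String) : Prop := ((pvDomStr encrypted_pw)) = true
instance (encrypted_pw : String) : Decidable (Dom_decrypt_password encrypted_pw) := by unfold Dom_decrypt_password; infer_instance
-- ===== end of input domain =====

-- B replaces A's shift/slice/concat/reverse pipeline by a single indexed pass over output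
-- positions with a modular source-index formula (alternative decomposition, same cost).

-- ===== PORT A =====
def decrypt_password (encrypted_pw : String) : String :=
  if encrypted_pw == "" then "" else
  let s := PySem.Str.rstrip encrypted_pw
  if s == "" || s == "Daizy" then "" else
  let t := s.toList
  let j : Int := t.length
  let step1 := t.map (fun c => Char.ofNat (c.toNat - 4))
  let half_j := PySem.Int.floordiv j 2
  let right_part := if half_j > 0 then PySem.List.slice step1 (some (-half_j)) none else []
  let left_part := PySem.List.slice step1 none (some (j - half_j))
  let combined := right_part ++ left_part
  String.ofList ((PySem.List.slice? combined none none (-1)).getD [])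

-- ===== PORT B =====
def decrypt_password_alt (encrypted_pw : String) : String :=
  if encrypted_pw == "" then "" else
  let s := PySem.Str.rstrip encrypted_pw
  if s == "" || s == "Daizy" then "" else
  let t := s.toList
  let n : Int := t.length
  let half := PySem.Int.floordiv n 2
  String.ofList ((PySem.List.pyRange 0 n 1).map (fun i =>
    Char.ofNat ((PySem.List.pyGetD t (PySem.Int.mod (2 * n - 1 - half - i) n) ' ').toNat - 4)))

-- ===== PRECONDITION & SPEC =====
def Spec_decrypt_password (encrypted_pw : String) (out : String) : Prop := out = decrypt_password_alt encrypted_pw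
instance (encrypted_pw : String) (out : String) : Decidable (Spec_decrypt_password encrypted_pw out) := by unfold Spec_decrypt_password; infer_instance

-- ===== CLAIM (what is proved, stated in full; the proofs are below) =====
def Claim_equal_decrypt_password : Prop := ∀ (encrypted_pw : String), Dom_decrypt_password encrypted_pw → Spec_decrypt_password encrypted_pw (decrypt_password encrypted_pw)

-- ===== LEMMAS AND PROOFS =====

-- the core list fact: reversing (rotate-by-half of the shifted list) is the single
-- indexed pass of B, for a nonempty list t
theorem pv_core (t : List Char) (ht : t ≠ []) :
    (((if (PySem.Int.floordiv (t.length : Int) 2) > 0 then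
         PySem.List.slice (t.map (fun c => Char.ofNat (c.toNat - 4))) (some (-(PySem.Int.floordiv (t.length : Int) 2))) none
       else []) ++
      PySem.List.slice (t.map (fun c => Char.ofNat (c.toNat - 4))) none (some ((t.length : Int) - PySem.Int.floordiv (t.length : Int) 2))).reverse)
    = (PySem.List.pyRange 0 (t.length : Int) 1).map (fun i =>
        Char.ofNat ((PySem.List.pyGetD t (PySem.Int.mod (2 * (t.length : Int) - 1 - PySem.Int.floordiv (t.length : Int) 2 - i) (t.length : Int)) ' ').toNat - 4)) := by
  have hm : 0 < t.length := List.length_pos_iff.mpr ht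
  set m := t.length with hmdef
  set t' := t.map (fun c => Char.ofNat (c.toNat - 4)) with ht'
  have hlen' : t'.length = m := by rw [ht', List.length_map]
  have hfd : PySem.Int.floordiv (m : Int) 2 = ((m / 2 : Nat) : Int) :=
    PySem.Int.floordiv_natCast m 2
  have hhm : m / 2 ≤ m := Nat.div_le_self _ _
  have hif : (if PySem.Int.floordiv (m : Int) 2 > 0 then
      PySem.List.slice t' (some (-(PySem.Int.floordiv (m : Int) 2))) none else [])
      = t'.drop (m - m / 2) := by
    rw [hfd]
    by_cases h0 : 0 < m / 2
    · rw [if_pos (by exact_mod_cast h0), PySem.List.slice_from_neg_natCast t' _ h0, hlen']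
    · have hz : m / 2 = 0 := by omega
      rw [hz]
      simp [List.drop_eq_nil_of_le (by omega : t'.length ≤ m)]
  have htake : PySem.List.slice t' none (some ((m : Int) - PySem.Int.floordiv (m : Int) 2))
      = t'.take (m - m / 2) := by
    have hc : (m : Int) - ((m / 2 : Nat) : Int) = ((m - m / 2 : Nat) : Int) := by omega
    rw [hfd, hc, PySem.List.slice_to_natCast]
  have hmap : (PySem.List.pyRange 0 (m : Int) 1).map (fun i =>
        Char.ofNat ((PySem.List.pyGetD t (PySem.Int.mod (2 * (m : Int) - 1 - PySem.Int.floordiv (m : Int) 2 - i) (m : Int)) ' ').toNat - 4))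
      = (List.range m).map (fun k =>
        Char.ofNat ((t.getD ((2 * m - 1 - m / 2 - k) % m) ' ').toNat - 4)) := by
    rw [PySem.List.pyRange_zero_natCast, List.map_map]
    apply List.map_congr_left
    intro k hk
    have hk' : k < m := List.mem_range.mp hk
    simp only [Function.comp_apply]
    have hc : 2 * (m : Int) - 1 - PySem.Int.floordiv (m : Int) 2 - (k : Int)
        = ((2 * m - 1 - m / 2 - k : Nat) : Int) := by rw [hfd]; omega
    rw [hc, PySem.Int.mod_natCast, PySem.List.pyGetD_natCast]
  rw [hif, htake, hmap]
  apply List.ext_getElem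
  · simp [hlen']
  · intro i hi1 hi2
    have hi : i < m := by simpa using hi2
    rw [List.getElem_reverse, List.getElem_map, List.getElem_range, List.getElem_append]
    have hdl : (t'.drop (m - m / 2)).length = m / 2 := by rw [List.length_drop, hlen']; omega
    have hlenA : (t'.drop (m - m / 2) ++ t'.take (m - m / 2)).length = m := by
      rw [List.length_append, hdl, List.length_take, hlen']; omega
    have hvm : (2 * m - 1 - m / 2 - i) % m
        = if i < m - m / 2 then m - 1 - m / 2 - i else 2 * m - 1 - m / 2 - i := by
      by_cases hcase : i < m - m / 2
      · have h1 : 2 * m - 1 - m / 2 - i = (m - 1 - m / 2 - i) + m := by omega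
        rw [h1, Nat.add_mod_right, Nat.mod_eq_of_lt (by omega), if_pos hcase]
      · rw [Nat.mod_eq_of_lt (by omega), if_neg hcase]
    rw [hvm]
    by_cases hcase : i < m - m / 2
    · rw [dif_neg (by rw [hdl, hlenA]; omega), if_pos hcase, List.getElem_take]
      simp only [hlenA, hdl]
      have hidx : m - 1 - i - m / 2 = m - 1 - m / 2 - i := by omega
      simp only [hidx, ht', List.getElem_map]
      rw [List.getD_eq_getElem t ' ' (by omega)]
    · rw [dif_pos (by rw [hdl, hlenA]; omega), if_neg hcase, List.getElem_drop]
      simp only [hlenA]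
      have hidx : m - m / 2 + (m - 1 - i) = 2 * m - 1 - m / 2 - i := by omega
      simp only [hidx, ht', List.getElem_map]
      rw [List.getD_eq_getElem t ' ' (by omega)]

-- ===== VERDICT (by name: the statement is the Claim_ definition above) =====
theorem decrypt_password_spec : Claim_equal_decrypt_password := by
  intro e _
  unfold Spec_decrypt_password decrypt_password decrypt_password_alt
  by_cases h1 : e == ""
  · simp [h1]
  · simp only [h1, Bool.false_eq_true, if_false]
    set s := PySem.Str.rstrip e with hs
    by_cases h2 : (s == "" || s == "Daizy") = true
    · simp [h2]
    · simp only [h2, Bool.false_eq_true, if_false]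
      have ht : s.toList ≠ [] := by
        intro h
        have : s = "" := String.toList_eq_nil_iff.mp h
        simp [this] at h2
      rw [PySem.List.slice?_none_none_neg_one]
      simp only [Option.getD_some]
      exact congrArg String.ofList (pv_core s.toList ht)
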